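-- pv_equiv track=rewrite | github.com/new-puzzle/AI-Learning-Project | utils/template_helpers.py | _generate_learning_subdivisions
-- ===== SOURCE A (Python) =====
-- from typing import List, Dict
--
-- def _generate_learning_subdivisions(name: str, description: str, category: str, level: str) -> List[str]:
--     """Generate subdivisions for learning goals - topic-based"""
--     subdivisions = []
--     name_lower = name.lower()
--     desc_lower = description.lower()
--
--     # STEM subjects
--     if 'chemistry' in name_lower or 'chemistry' in desc_lower:
--         if 'organic' in name_lower:
--             if level == 'Beginner':
--                 subdivisions = ['Molecular Structure & Bonding', 'Nomenclature & Functional Groups',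
--                               'Basic Reactions', 'Stereochemistry Basics']
--             elif level == 'Intermediate':
--                 subdivisions = ['Reaction Mechanisms', 'Stereochemistry & Chirality',
--                               'Synthesis Strategies', 'Spectroscopy Analysis']
--             else:  # Advanced
--                 subdivisions = ['Advanced Synthesis', 'Retrosynthetic Analysis',
--                               'Complex Mechanisms', 'Multi-step Synthesis']
--         else:
--             subdivisions = ['Atomic Structure', 'Chemical Bonding', 'Reactions & Equations', 'Lab Techniques']
--
--     # Programming/Tech
--     elif any(term in name_lower for term in ['python', 'javascript', 'java', 'programming', 'coding']):
--         if level == 'Beginner':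
--             subdivisions = ['Syntax & Basics', 'Control Structures', 'Functions & Modules', 'Basic Projects']
--         elif level == 'Intermediate':
--             subdivisions = ['Data Structures', 'Object-Oriented Programming', 'APIs & Libraries', 'Real Projects']
--         else:
--             subdivisions = ['Advanced Patterns', 'Architecture & Design', 'Performance Optimization', 'Complex Systems']
--
--     # AI/ML
--     elif any(term in name_lower for term in ['ai', 'machine learning', 'deep learning', 'neural', 'prompt']):
--         if level == 'Beginner':
--             subdivisions = ['Fundamentals & Concepts', 'Basic Models', 'Practical Applications', 'Tools & Frameworks']
--         elif level == 'Intermediate':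
--             subdivisions = ['Model Architecture', 'Training & Optimization', 'Real-world Projects', 'Advanced Techniques']
--         else:
--             subdivisions = ['Research & Innovation', 'Advanced Architectures', 'Production Systems', 'Cutting-edge Methods']
--
--     # Data Science
--     elif 'data science' in name_lower or 'data analysis' in name_lower:
--         if level == 'Beginner':
--             subdivisions = ['Data Basics & Cleaning', 'Basic Statistics', 'Simple Visualizations', 'Introduction to Tools']
--         elif level == 'Intermediate':
--             subdivisions = ['Data Wrangling & Transformation', 'Statistical Analysis', 'Advanced Visualization', 'Machine Learning Basics']
--         else:
--             subdivisions = ['Advanced Data Engineering', 'Statistical Modeling', 'Complex Visualizations', 'Advanced ML & Deep Learning']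
--
--     # Languages
--     elif any(term in name_lower for term in ['language', 'spanish', 'french', 'german', 'japanese', 'chinese']):
--         if level == 'Beginner':
--             subdivisions = ['Basic Vocabulary & Phrases', 'Pronunciation Basics', 'Simple Conversations', 'Grammar Foundations']
--         elif level == 'Intermediate':
--             subdivisions = ['Grammar & Vocabulary Expansion', 'Speaking & Pronunciation', 'Reading & Writing', 'Cultural Context']
--         else:
--             subdivisions = ['Advanced Grammar & Idioms', 'Fluency & Nuance', 'Literature & Media', 'Cultural Mastery']
--
--     # Business/Finance
--     elif any(term in name_lower for term in ['business', 'finance', 'marketing', 'management']):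
--         if level == 'Beginner':
--             subdivisions = ['Core Concepts & Fundamentals', 'Basic Principles', 'Introduction to Tools', 'Simple Case Studies']
--         elif level == 'Intermediate':
--             subdivisions = ['Core Concepts', 'Practical Strategies', 'Case Studies', 'Real-world Application']
--         else:
--             subdivisions = ['Advanced Strategies', 'Complex Case Analysis', 'Strategic Planning', 'Leadership & Innovation']
--
--     # Arts/Creative
--     elif any(term in name_lower for term in ['art', 'design', 'music', 'guitar', 'piano', 'drawing', 'photography']):
--         if level == 'Beginner':
--             subdivisions = ['Fundamentals & Basics', 'Basic Techniques', 'Simple Exercises', 'Getting Started']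
--         elif level == 'Intermediate':
--             subdivisions = ['Fundamentals & Technique', 'Practice & Exercises', 'Creative Projects', 'Style Development']
--         else:
--             subdivisions = ['Advanced Techniques', 'Mastery & Refinement', 'Complex Projects', 'Personal Style & Innovation']
--
--     return subdivisions
-- ===== SOURCE B (Python) =====
-- from typing import List
--
-- # Flat keyword table: (keyword, search_in_name, topic_id).  Topic precedence is
-- # encoded in the numeric ids; chemistry (1) is refined to organic chemistry (0)
-- # when 'organic' occurs in the name.
-- _KEYWORDS = [
--     ('chemistry', True, 1), ('chemistry', False, 1),
--     ('python', True, 2), ('javascript', True, 2), ('java', True, 2),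
--     ('programming', True, 2), ('coding', True, 2),
--     ('ai', True, 3), ('machine learning', True, 3), ('deep learning', True, 3),
--     ('neural', True, 3), ('prompt', True, 3),
--     ('data science', True, 4), ('data analysis', True, 4),
--     ('language', True, 5), ('spanish', True, 5), ('french', True, 5),
--     ('german', True, 5), ('japanese', True, 5), ('chinese', True, 5),
--     ('business', True, 6), ('finance', True, 6), ('marketing', True, 6),
--     ('management', True, 6),
--     ('art', True, 7), ('design', True, 7), ('music', True, 7),
--     ('guitar', True, 7), ('piano', True, 7), ('drawing', True, 7),
--     ('photography', True, 7),
-- ]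
--
-- _BUCKETS = {'Beginner': 0, 'Intermediate': 1}
--
-- # One flat table keyed by (topic_id, level_bucket).
-- _LISTS = {
--     (0, 0): ['Molecular Structure & Bonding', 'Nomenclature & Functional Groups',
--              'Basic Reactions', 'Stereochemistry Basics'],
--     (0, 1): ['Reaction Mechanisms', 'Stereochemistry & Chirality',
--              'Synthesis Strategies', 'Spectroscopy Analysis'],
--     (0, 2): ['Advanced Synthesis', 'Retrosynthetic Analysis',
--              'Complex Mechanisms', 'Multi-step Synthesis'],
--     (1, 0): ['Atomic Structure', 'Chemical Bonding', 'Reactions & Equations', 'Lab Techniques'],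
--     (1, 1): ['Atomic Structure', 'Chemical Bonding', 'Reactions & Equations', 'Lab Techniques'],
--     (1, 2): ['Atomic Structure', 'Chemical Bonding', 'Reactions & Equations', 'Lab Techniques'],
--     (2, 0): ['Syntax & Basics', 'Control Structures', 'Functions & Modules', 'Basic Projects'],
--     (2, 1): ['Data Structures', 'Object-Oriented Programming', 'APIs & Libraries', 'Real Projects'],
--     (2, 2): ['Advanced Patterns', 'Architecture & Design', 'Performance Optimization', 'Complex Systems'],
--     (3, 0): ['Fundamentals & Concepts', 'Basic Models', 'Practical Applications', 'Tools & Frameworks'],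
--     (3, 1): ['Model Architecture', 'Training & Optimization', 'Real-world Projects', 'Advanced Techniques'],
--     (3, 2): ['Research & Innovation', 'Advanced Architectures', 'Production Systems', 'Cutting-edge Methods'],
--     (4, 0): ['Data Basics & Cleaning', 'Basic Statistics', 'Simple Visualizations', 'Introduction to Tools'],
--     (4, 1): ['Data Wrangling & Transformation', 'Statistical Analysis', 'Advanced Visualization', 'Machine Learning Basics'],
--     (4, 2): ['Advanced Data Engineering', 'Statistical Modeling', 'Complex Visualizations', 'Advanced ML & Deep Learning'],
--     (5, 0): ['Basic Vocabulary & Phrases', 'Pronunciation Basics', 'Simple Conversations', 'Grammar Foundations'],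
--     (5, 1): ['Grammar & Vocabulary Expansion', 'Speaking & Pronunciation', 'Reading & Writing', 'Cultural Context'],
--     (5, 2): ['Advanced Grammar & Idioms', 'Fluency & Nuance', 'Literature & Media', 'Cultural Mastery'],
--     (6, 0): ['Core Concepts & Fundamentals', 'Basic Principles', 'Introduction to Tools', 'Simple Case Studies'],
--     (6, 1): ['Core Concepts', 'Practical Strategies', 'Case Studies', 'Real-world Application'],
--     (6, 2): ['Advanced Strategies', 'Complex Case Analysis', 'Strategic Planning', 'Leadership & Innovation'],
--     (7, 0): ['Fundamentals & Basics', 'Basic Techniques', 'Simple Exercises', 'Getting Started'],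
--     (7, 1): ['Fundamentals & Technique', 'Practice & Exercises', 'Creative Projects', 'Style Development'],
--     (7, 2): ['Advanced Techniques', 'Mastery & Refinement', 'Complex Projects', 'Personal Style & Innovation'],
-- }
--
--
-- def _generate_learning_subdivisions(name: str, description: str, category: str, level: str) -> List[str]:
--     """Generate subdivisions for learning goals - topic-based.
--
--     Instead of an if/elif precedence chain, scan ALL keywords once, collect the
--     topic ids they hit, and aggregate by min (precedence = smallest id)."""
--     name_lower = name.lower()
--     desc_lower = description.lower()
--     matches = [tid for kw, in_name, tid in _KEYWORDS
--                if kw in (name_lower if in_name else desc_lower)]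
--     if not matches:
--         return []
--     tid = min(matches)
--     if tid == 1 and 'organic' in name_lower:
--         tid = 0
--     return list(_LISTS[(tid, _BUCKETS.get(level, 2))])
-- ===== Notes on version B (the rewrite author's own statement) =====
-- stated objective: alternative
-- what changed: Replaced A's ordered if/elif precedence chain by a single flat scan over all (keyword, field, topic-id) triples that collects every matching topic id, aggregates by min (precedence becomes numeric order), refines chemistry to organic chemistry, and indexes one flat (topic, level-bucket)-keyed table.
import Mathlib
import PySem

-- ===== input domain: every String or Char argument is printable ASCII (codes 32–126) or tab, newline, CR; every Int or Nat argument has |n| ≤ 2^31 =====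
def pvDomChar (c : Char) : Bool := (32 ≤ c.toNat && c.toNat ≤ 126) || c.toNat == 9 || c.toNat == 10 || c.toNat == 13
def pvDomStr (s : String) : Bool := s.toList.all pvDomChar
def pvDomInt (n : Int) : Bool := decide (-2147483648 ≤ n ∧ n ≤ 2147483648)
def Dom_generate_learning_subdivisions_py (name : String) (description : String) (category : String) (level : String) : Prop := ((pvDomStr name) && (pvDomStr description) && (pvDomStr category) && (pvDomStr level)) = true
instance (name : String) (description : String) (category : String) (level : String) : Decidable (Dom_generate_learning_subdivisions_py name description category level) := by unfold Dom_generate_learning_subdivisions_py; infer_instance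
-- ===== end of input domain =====

-- B replaces A's ordered if/elif chain by one flat scan over all (keyword, field, topic-id)
-- triples, aggregating the matched topic ids by min; objective: alternative.

-- ===== PORT A =====
-- literal transliteration of the if/elif chain of _generate_learning_subdivisions
def generate_learning_subdivisions_py (name : String) (description : String) (category : String) (level : String) : List String :=
  let name_lower := PySem.Str.lower name
  let desc_lower := PySem.Str.lower description
  if PySem.Str.isIn "chemistry" name_lower || PySem.Str.isIn "chemistry" desc_lower then
    if PySem.Str.isIn "organic" name_lower then
      if level == "Beginner" then
        ["Molecular Structure & Bonding", "Nomenclature & Functional Groups",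
         "Basic Reactions", "Stereochemistry Basics"]
      else if level == "Intermediate" then
        ["Reaction Mechanisms", "Stereochemistry & Chirality",
         "Synthesis Strategies", "Spectroscopy Analysis"]
      else
        ["Advanced Synthesis", "Retrosynthetic Analysis",
         "Complex Mechanisms", "Multi-step Synthesis"]
    else
      ["Atomic Structure", "Chemical Bonding", "Reactions & Equations", "Lab Techniques"]
  else if ["python", "javascript", "java", "programming", "coding"].any (fun term => PySem.Str.isIn term name_lower) then
    if level == "Beginner" then
      ["Syntax & Basics", "Control Structures", "Functions & Modules", "Basic Projects"]
    else if level == "Intermediate" then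
      ["Data Structures", "Object-Oriented Programming", "APIs & Libraries", "Real Projects"]
    else
      ["Advanced Patterns", "Architecture & Design", "Performance Optimization", "Complex Systems"]
  else if ["ai", "machine learning", "deep learning", "neural", "prompt"].any (fun term => PySem.Str.isIn term name_lower) then
    if level == "Beginner" then
      ["Fundamentals & Concepts", "Basic Models", "Practical Applications", "Tools & Frameworks"]
    else if level == "Intermediate" then
      ["Model Architecture", "Training & Optimization", "Real-world Projects", "Advanced Techniques"]
    else
      ["Research & Innovation", "Advanced Architectures", "Production Systems", "Cutting-edge Methods"]
  else if PySem.Str.isIn "data science" name_lower || PySem.Str.isIn "data analysis" name_lower then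
    if level == "Beginner" then
      ["Data Basics & Cleaning", "Basic Statistics", "Simple Visualizations", "Introduction to Tools"]
    else if level == "Intermediate" then
      ["Data Wrangling & Transformation", "Statistical Analysis", "Advanced Visualization", "Machine Learning Basics"]
    else
      ["Advanced Data Engineering", "Statistical Modeling", "Complex Visualizations", "Advanced ML & Deep Learning"]
  else if ["language", "spanish", "french", "german", "japanese", "chinese"].any (fun term => PySem.Str.isIn term name_lower) then
    if level == "Beginner" then
      ["Basic Vocabulary & Phrases", "Pronunciation Basics", "Simple Conversations", "Grammar Foundations"]
    else if level == "Intermediate" then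
      ["Grammar & Vocabulary Expansion", "Speaking & Pronunciation", "Reading & Writing", "Cultural Context"]
    else
      ["Advanced Grammar & Idioms", "Fluency & Nuance", "Literature & Media", "Cultural Mastery"]
  else if ["business", "finance", "marketing", "management"].any (fun term => PySem.Str.isIn term name_lower) then
    if level == "Beginner" then
      ["Core Concepts & Fundamentals", "Basic Principles", "Introduction to Tools", "Simple Case Studies"]
    else if level == "Intermediate" then
      ["Core Concepts", "Practical Strategies", "Case Studies", "Real-world Application"]
    else
      ["Advanced Strategies", "Complex Case Analysis", "Strategic Planning", "Leadership & Innovation"]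
  else if ["art", "design", "music", "guitar", "piano", "drawing", "photography"].any (fun term => PySem.Str.isIn term name_lower) then
    if level == "Beginner" then
      ["Fundamentals & Basics", "Basic Techniques", "Simple Exercises", "Getting Started"]
    else if level == "Intermediate" then
      ["Fundamentals & Technique", "Practice & Exercises", "Creative Projects", "Style Development"]
    else
      ["Advanced Techniques", "Mastery & Refinement", "Complex Projects", "Personal Style & Innovation"]
  else
    []

-- ===== PORT B =====
-- _KEYWORDS: flat (keyword, search-in-name?, topic-id) triples
def pvKeywords : List (String × Bool × Int) :=
  [("chemistry", true, 1), ("chemistry", false, 1),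
   ("python", true, 2), ("javascript", true, 2), ("java", true, 2),
   ("programming", true, 2), ("coding", true, 2),
   ("ai", true, 3), ("machine learning", true, 3), ("deep learning", true, 3),
   ("neural", true, 3), ("prompt", true, 3),
   ("data science", true, 4), ("data analysis", true, 4),
   ("language", true, 5), ("spanish", true, 5), ("french", true, 5),
   ("german", true, 5), ("japanese", true, 5), ("chinese", true, 5),
   ("business", true, 6), ("finance", true, 6), ("marketing", true, 6),
   ("management", true, 6),
   ("art", true, 7), ("design", true, 7), ("music", true, 7),
   ("guitar", true, 7), ("piano", true, 7), ("drawing", true, 7),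
   ("photography", true, 7)]

-- _BUCKETS
def pvBuckets : PySem.Dict String Int :=
  PySem.Dict.ofList [("Beginner", 0), ("Intermediate", 1)]

-- _LISTS: one flat table keyed by (topic_id, level_bucket)
def pvLists : PySem.Dict (Int × Int) (List String) :=
  PySem.Dict.ofList
    [((0, 0), ["Molecular Structure & Bonding", "Nomenclature & Functional Groups",
               "Basic Reactions", "Stereochemistry Basics"]),
     ((0, 1), ["Reaction Mechanisms", "Stereochemistry & Chirality",
               "Synthesis Strategies", "Spectroscopy Analysis"]),
     ((0, 2), ["Advanced Synthesis", "Retrosynthetic Analysis",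
               "Complex Mechanisms", "Multi-step Synthesis"]),
     ((1, 0), ["Atomic Structure", "Chemical Bonding", "Reactions & Equations", "Lab Techniques"]),
     ((1, 1), ["Atomic Structure", "Chemical Bonding", "Reactions & Equations", "Lab Techniques"]),
     ((1, 2), ["Atomic Structure", "Chemical Bonding", "Reactions & Equations", "Lab Techniques"]),
     ((2, 0), ["Syntax & Basics", "Control Structures", "Functions & Modules", "Basic Projects"]),
     ((2, 1), ["Data Structures", "Object-Oriented Programming", "APIs & Libraries", "Real Projects"]),
     ((2, 2), ["Advanced Patterns", "Architecture & Design", "Performance Optimization", "Complex Systems"]),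
     ((3, 0), ["Fundamentals & Concepts", "Basic Models", "Practical Applications", "Tools & Frameworks"]),
     ((3, 1), ["Model Architecture", "Training & Optimization", "Real-world Projects", "Advanced Techniques"]),
     ((3, 2), ["Research & Innovation", "Advanced Architectures", "Production Systems", "Cutting-edge Methods"]),
     ((4, 0), ["Data Basics & Cleaning", "Basic Statistics", "Simple Visualizations", "Introduction to Tools"]),
     ((4, 1), ["Data Wrangling & Transformation", "Statistical Analysis", "Advanced Visualization", "Machine Learning Basics"]),
     ((4, 2), ["Advanced Data Engineering", "Statistical Modeling", "Complex Visualizations", "Advanced ML & Deep Learning"]),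
     ((5, 0), ["Basic Vocabulary & Phrases", "Pronunciation Basics", "Simple Conversations", "Grammar Foundations"]),
     ((5, 1), ["Grammar & Vocabulary Expansion", "Speaking & Pronunciation", "Reading & Writing", "Cultural Context"]),
     ((5, 2), ["Advanced Grammar & Idioms", "Fluency & Nuance", "Literature & Media", "Cultural Mastery"]),
     ((6, 0), ["Core Concepts & Fundamentals", "Basic Principles", "Introduction to Tools", "Simple Case Studies"]),
     ((6, 1), ["Core Concepts", "Practical Strategies", "Case Studies", "Real-world Application"]),
     ((6, 2), ["Advanced Strategies", "Complex Case Analysis", "Strategic Planning", "Leadership & Innovation"]),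
     ((7, 0), ["Fundamentals & Basics", "Basic Techniques", "Simple Exercises", "Getting Started"]),
     ((7, 1), ["Fundamentals & Technique", "Practice & Exercises", "Creative Projects", "Style Development"]),
     ((7, 2), ["Advanced Techniques", "Mastery & Refinement", "Complex Projects", "Personal Style & Innovation"])]

-- matches = [tid for kw, in_name, tid in _KEYWORDS if kw in (name_lower if in_name else desc_lower)]
def pvMatches (nl dl : String) : List Int :=
  pvKeywords.filterMap (fun t =>
    if PySem.Str.isIn t.1 (if t.2.1 then nl else dl) then some t.2.2 else none)

def generate_learning_subdivisions_py_alt (name : String) (description : String) (category : String) (level : String) : List String :=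
  let name_lower := PySem.Str.lower name
  let desc_lower := PySem.Str.lower description
  match PySem.List.min? (pvMatches name_lower desc_lower) (fun x => x) with
  | none => []                        -- if not matches: return []
  | some tid0 =>
    let tid : Int := if tid0 == 1 && PySem.Str.isIn "organic" name_lower then 0 else tid0
    -- _LISTS[(tid, _BUCKETS.get(level, 2))]: the key is always present (tid ∈ 0..7,
    -- bucket ∈ 0..2), so the total getD with default [] is exact here
    PySem.Dict.getD pvLists (tid, PySem.Dict.getD pvBuckets level 2) []

-- ===== PRECONDITION & SPEC =====
def Spec_generate_learning_subdivisions_py (name : String) (description : String) (category : String) (level : String) (out : List String) : Prop := out = generate_learning_subdivisions_py_alt name description category level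
instance (name : String) (description : String) (category : String) (level : String) (out : List String) : Decidable (Spec_generate_learning_subdivisions_py name description category level out) := by unfold Spec_generate_learning_subdivisions_py; infer_instance

-- ===== CLAIM =====
def Claim_equal_generate_learning_subdivisions_py : Prop := ∀ (name : String) (description : String) (category : String) (level : String), Dom_generate_learning_subdivisions_py name description category level → Spec_generate_learning_subdivisions_py name description category level (generate_learning_subdivisions_py name description category level)

-- ===== LEMMAS AND PROOFS =====
-- min over a list that contains k and is bounded below by k is k
theorem pv_min_matches_eq (xs : List Int) (k : Int) (hk : k ∈ xs)
    (hlb : ∀ m ∈ xs, k ≤ m) : PySem.List.min? xs (fun x => x) = some k := by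
  cases h : PySem.List.min? xs (fun x => x) with
  | none =>
    rw [PySem.List.min?_eq_none_iff] at h
    subst h; cases hk
  | some m =>
    have h1 : m ∈ xs := PySem.List.min?_mem h
    have h2 := PySem.List.min?_isMin h k hk
    have h3 := hlb m h1
    exact congrArg some (le_antisymm (by omega) h3)

-- any keyword whose topic id is below k and could fire is off ⇒ every match is ≥ k
theorem pv_matches_lb (nl dl : String) (k : Int)
    (h : ∀ t ∈ pvKeywords, t.2.2 < k →
      PySem.Str.isIn t.1 (if t.2.1 then nl else dl) = false) :
    ∀ m ∈ pvMatches nl dl, k ≤ m := by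
  intro m hm
  rw [pvMatches, List.mem_filterMap] at hm
  obtain ⟨t, ht, hf⟩ := hm
  by_contra hlt
  rw [Int.not_le] at hlt
  cases hcond : PySem.Str.isIn t.1 (if t.2.1 then nl else dl) with
  | false =>
    rw [if_neg (by simp only [hcond]; decide)] at hf; cases hf
  | true =>
    rw [if_pos hcond] at hf
    cases hf
    have h2 := h t ht hlt
    rw [h2] at hcond; cases hcond

-- a fired keyword puts its topic id in matches
theorem pv_matches_mem (nl dl : String) (t : String × Bool × Int) (ht : t ∈ pvKeywords)
    (hkw : PySem.Str.isIn t.1 (if t.2.1 then nl else dl) = true) :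
    t.2.2 ∈ pvMatches nl dl := by
  rw [pvMatches, List.mem_filterMap]
  exact ⟨t, ht, by rw [if_pos hkw]⟩

-- ===== VERDICT =====
-- (if b then some x else none) = none, for b = false
theorem pv_none_of_false {α : Type} {b : Bool} (h : b = false) {x : α} :
    (if b = true then some x else none) = (none : Option α) := by
  rw [h]; rfl

-- dispatch on the level once the topic id is fixed
theorem pv_level_cases (level : String) (goal : String → Prop)
    (hB : level = "Beginner" → goal level)
    (hI : level = "Intermediate" → goal level)
    (hO : (level == "Beginner") = false → (level == "Intermediate") = false →
      PySem.Dict.getD pvBuckets level 2 = 2 → goal level) : goal level := by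
  by_cases h1 : level = "Beginner"
  · exact hB h1
  · by_cases h2 : level = "Intermediate"
    · exact hI h2
    · have g1 : ("Beginner" == level) = false := beq_eq_false_iff_ne.mpr (Ne.symm h1)
      have g2 : ("Intermediate" == level) = false := beq_eq_false_iff_ne.mpr (Ne.symm h2)
      refine hO (beq_eq_false_iff_ne.mpr h1) (beq_eq_false_iff_ne.mpr h2) ?_
      simp [pvBuckets, PySem.Dict.ofList, PySem.Dict.getD, PySem.Dict.get?,
            PySem.Dict.insert, PySem.Dict.update, PySem.Dict.contains,
            PySem.Dict.empty, List.find?, g1, g2]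

-- ===== VERDICT =====
set_option maxHeartbeats 4000000 in
theorem generate_learning_subdivisions_py_spec : Claim_equal_generate_learning_subdivisions_py := by
  intro name description category level _
  unfold Spec_generate_learning_subdivisions_py
  unfold generate_learning_subdivisions_py generate_learning_subdivisions_py_alt
  dsimp only
  cases hc : PySem.Str.isIn "chemistry" (PySem.Str.lower name) || PySem.Str.isIn "chemistry" (PySem.Str.lower description) with
  | true =>
    have hmem : (1 : Int) ∈ pvMatches (PySem.Str.lower name) (PySem.Str.lower description) := by
      rw [Bool.or_eq_true] at hc
      rcases hc with h | h
      · exact pv_matches_mem _ _ ("chemistry", true, 1) (by decide) h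
      · exact pv_matches_mem _ _ ("chemistry", false, 1) (by decide) h
    have hall : ∀ t ∈ pvKeywords, (1 : Int) ≤ t.2.2 := by decide
    have hmin := pv_min_matches_eq _ 1 hmem
      (pv_matches_lb _ _ 1 (fun t ht hlt => absurd (hall t ht) (by omega)))
    rw [hmin]
    cases ho : PySem.Str.isIn "organic" (PySem.Str.lower name) with
    | true =>
      refine pv_level_cases level (fun l => _ = _) ?_ ?_ ?_
      · intro h; subst h; rfl
      · intro h; subst h; rfl
      · intro h1 h2 h3; simp only [h1, h2, h3]; rfl
    | false =>
      refine pv_level_cases level (fun l => _ = _) ?_ ?_ ?_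
      · intro h; subst h; rfl
      · intro h; subst h; rfl
      · intro h1 h2 h3; simp only [h1, h2, h3]; rfl
  | false =>
    rw [Bool.or_eq_false_iff] at hc
    obtain ⟨hc1, hc2⟩ := hc
    cases hpx : List.any ["python", "javascript", "java", "programming", "coding"] (fun term => PySem.Str.isIn term (PySem.Str.lower name)) with
    | true =>
      have hmem : (2 : Int) ∈ pvMatches (PySem.Str.lower name) (PySem.Str.lower description) := by
        rw [List.any_eq_true] at hpx
        obtain ⟨kw, hkm, hkp⟩ := hpx
        fin_cases hkm
        · exact pv_matches_mem _ _ ("python", true, 2) (by decide) hkp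
        · exact pv_matches_mem _ _ ("javascript", true, 2) (by decide) hkp
        · exact pv_matches_mem _ _ ("java", true, 2) (by decide) hkp
        · exact pv_matches_mem _ _ ("programming", true, 2) (by decide) hkp
        · exact pv_matches_mem _ _ ("coding", true, 2) (by decide) hkp
      have hlb : ∀ m ∈ pvMatches (PySem.Str.lower name) (PySem.Str.lower description), (2:Int) ≤ m := by
        apply pv_matches_lb
        intro t ht hlt
        fin_cases ht
        · exact hc1
        · exact hc2
        · exact absurd hlt (by decide)
        · exact absurd hlt (by decide)
        · exact absurd hlt (by decide)
        · exact absurd hlt (by decide)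
        · exact absurd hlt (by decide)
        · exact absurd hlt (by decide)
        · exact absurd hlt (by decide)
        · exact absurd hlt (by decide)
        · exact absurd hlt (by decide)
        · exact absurd hlt (by decide)
        · exact absurd hlt (by decide)
        · exact absurd hlt (by decide)
        · exact absurd hlt (by decide)
        · exact absurd hlt (by decide)
        · exact absurd hlt (by decide)
        · exact absurd hlt (by decide)
        · exact absurd hlt (by decide)
        · exact absurd hlt (by decide)
        · exact absurd hlt (by decide)
        · exact absurd hlt (by decide)
        · exact absurd hlt (by decide)
        · exact absurd hlt (by decide)
        · exact absurd hlt (by decide)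
        · exact absurd hlt (by decide)
        · exact absurd hlt (by decide)
        · exact absurd hlt (by decide)
        · exact absurd hlt (by decide)
        · exact absurd hlt (by decide)
        · exact absurd hlt (by decide)
      rw [pv_min_matches_eq _ 2 hmem hlb]
      refine pv_level_cases level (fun l => _ = _) ?_ ?_ ?_
      · intro h; subst h; rfl
      · intro h; subst h; rfl
      · intro h1 h2 h3; simp only [h1, h2, h3]; rfl
    | false =>
      rw [show (["python", "javascript", "java", "programming", "coding"].any (fun term => PySem.Str.isIn term (PySem.Str.lower name))) = (PySem.Str.isIn "python" (PySem.Str.lower name) || (PySem.Str.isIn "javascript" (PySem.Str.lower name) || (PySem.Str.isIn "java" (PySem.Str.lower name) || (PySem.Str.isIn "programming" (PySem.Str.lower name) || PySem.Str.isIn "coding" (PySem.Str.lower name))))) from by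
        simp only [List.any_cons, List.any_nil, Bool.or_false]] at hpx
      simp only [Bool.or_eq_false_iff] at hpx
      obtain ⟨hp1, hp2, hp3, hp4, hp5⟩ := hpx
      cases hax : List.any ["ai", "machine learning", "deep learning", "neural", "prompt"] (fun term => PySem.Str.isIn term (PySem.Str.lower name)) with
      | true =>
        have hmem : (3 : Int) ∈ pvMatches (PySem.Str.lower name) (PySem.Str.lower description) := by
          rw [List.any_eq_true] at hax
          obtain ⟨kw, hkm, hkp⟩ := hax
          fin_cases hkm
          · exact pv_matches_mem _ _ ("ai", true, 3) (by decide) hkp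
          · exact pv_matches_mem _ _ ("machine learning", true, 3) (by decide) hkp
          · exact pv_matches_mem _ _ ("deep learning", true, 3) (by decide) hkp
          · exact pv_matches_mem _ _ ("neural", true, 3) (by decide) hkp
          · exact pv_matches_mem _ _ ("prompt", true, 3) (by decide) hkp
        have hlb : ∀ m ∈ pvMatches (PySem.Str.lower name) (PySem.Str.lower description), (3:Int) ≤ m := by
          apply pv_matches_lb
          intro t ht hlt
          fin_cases ht
          · exact hc1
          · exact hc2
          · exact hp1
          · exact hp2
          · exact hp3
          · exact hp4
          · exact hp5
          · exact absurd hlt (by decide)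
          · exact absurd hlt (by decide)
          · exact absurd hlt (by decide)
          · exact absurd hlt (by decide)
          · exact absurd hlt (by decide)
          · exact absurd hlt (by decide)
          · exact absurd hlt (by decide)
          · exact absurd hlt (by decide)
          · exact absurd hlt (by decide)
          · exact absurd hlt (by decide)
          · exact absurd hlt (by decide)
          · exact absurd hlt (by decide)
          · exact absurd hlt (by decide)
          · exact absurd hlt (by decide)
          · exact absurd hlt (by decide)
          · exact absurd hlt (by decide)
          · exact absurd hlt (by decide)
          · exact absurd hlt (by decide)
          · exact absurd hlt (by decide)
          · exact absurd hlt (by decide)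
          · exact absurd hlt (by decide)
          · exact absurd hlt (by decide)
          · exact absurd hlt (by decide)
          · exact absurd hlt (by decide)
        rw [pv_min_matches_eq _ 3 hmem hlb]
        refine pv_level_cases level (fun l => _ = _) ?_ ?_ ?_
        · intro h; subst h; rfl
        · intro h; subst h; rfl
        · intro h1 h2 h3; simp only [h1, h2, h3]; rfl
      | false =>
        rw [show (["ai", "machine learning", "deep learning", "neural", "prompt"].any (fun term => PySem.Str.isIn term (PySem.Str.lower name))) = (PySem.Str.isIn "ai" (PySem.Str.lower name) || (PySem.Str.isIn "machine learning" (PySem.Str.lower name) || (PySem.Str.isIn "deep learning" (PySem.Str.lower name) || (PySem.Str.isIn "neural" (PySem.Str.lower name) || PySem.Str.isIn "prompt" (PySem.Str.lower name))))) from by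
          simp only [List.any_cons, List.any_nil, Bool.or_false]] at hax
        simp only [Bool.or_eq_false_iff] at hax
        obtain ⟨ha1, ha2, ha3, ha4, ha5⟩ := hax
        cases hd : PySem.Str.isIn "data science" (PySem.Str.lower name) || PySem.Str.isIn "data analysis" (PySem.Str.lower name) with
        | true =>
          have hmem : (4 : Int) ∈ pvMatches (PySem.Str.lower name) (PySem.Str.lower description) := by
            rw [Bool.or_eq_true] at hd
            rcases hd with h | h
            · exact pv_matches_mem _ _ ("data science", true, 4) (by decide) h
            · exact pv_matches_mem _ _ ("data analysis", true, 4) (by decide) h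
          have hlb : ∀ m ∈ pvMatches (PySem.Str.lower name) (PySem.Str.lower description), (4:Int) ≤ m := by
            apply pv_matches_lb
            intro t ht hlt
            fin_cases ht
            · exact hc1
            · exact hc2
            · exact hp1
            · exact hp2
            · exact hp3
            · exact hp4
            · exact hp5
            · exact ha1
            · exact ha2
            · exact ha3
            · exact ha4
            · exact ha5
            · exact absurd hlt (by decide)
            · exact absurd hlt (by decide)
            · exact absurd hlt (by decide)
            · exact absurd hlt (by decide)
            · exact absurd hlt (by decide)
            · exact absurd hlt (by decide)
            · exact absurd hlt (by decide)
            · exact absurd hlt (by decide)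
            · exact absurd hlt (by decide)
            · exact absurd hlt (by decide)
            · exact absurd hlt (by decide)
            · exact absurd hlt (by decide)
            · exact absurd hlt (by decide)
            · exact absurd hlt (by decide)
            · exact absurd hlt (by decide)
            · exact absurd hlt (by decide)
            · exact absurd hlt (by decide)
            · exact absurd hlt (by decide)
            · exact absurd hlt (by decide)
          rw [pv_min_matches_eq _ 4 hmem hlb]
          refine pv_level_cases level (fun l => _ = _) ?_ ?_ ?_
          · intro h; subst h; rfl
          · intro h; subst h; rfl
          · intro h1 h2 h3; simp only [h1, h2, h3]; rfl
        | false =>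
          rw [Bool.or_eq_false_iff] at hd
          obtain ⟨hd1, hd2⟩ := hd
          cases hlx : List.any ["language", "spanish", "french", "german", "japanese", "chinese"] (fun term => PySem.Str.isIn term (PySem.Str.lower name)) with
          | true =>
            have hmem : (5 : Int) ∈ pvMatches (PySem.Str.lower name) (PySem.Str.lower description) := by
              rw [List.any_eq_true] at hlx
              obtain ⟨kw, hkm, hkp⟩ := hlx
              fin_cases hkm
              · exact pv_matches_mem _ _ ("language", true, 5) (by decide) hkp
              · exact pv_matches_mem _ _ ("spanish", true, 5) (by decide) hkp
              · exact pv_matches_mem _ _ ("french", true, 5) (by decide) hkp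
              · exact pv_matches_mem _ _ ("german", true, 5) (by decide) hkp
              · exact pv_matches_mem _ _ ("japanese", true, 5) (by decide) hkp
              · exact pv_matches_mem _ _ ("chinese", true, 5) (by decide) hkp
            have hlb : ∀ m ∈ pvMatches (PySem.Str.lower name) (PySem.Str.lower description), (5:Int) ≤ m := by
              apply pv_matches_lb
              intro t ht hlt
              fin_cases ht
              · exact hc1
              · exact hc2
              · exact hp1
              · exact hp2
              · exact hp3
              · exact hp4
              · exact hp5
              · exact ha1
              · exact ha2
              · exact ha3
              · exact ha4
              · exact ha5
              · exact hd1
              · exact hd2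
              · exact absurd hlt (by decide)
              · exact absurd hlt (by decide)
              · exact absurd hlt (by decide)
              · exact absurd hlt (by decide)
              · exact absurd hlt (by decide)
              · exact absurd hlt (by decide)
              · exact absurd hlt (by decide)
              · exact absurd hlt (by decide)
              · exact absurd hlt (by decide)
              · exact absurd hlt (by decide)
              · exact absurd hlt (by decide)
              · exact absurd hlt (by decide)
              · exact absurd hlt (by decide)
              · exact absurd hlt (by decide)
              · exact absurd hlt (by decide)
              · exact absurd hlt (by decide)
              · exact absurd hlt (by decide)
            rw [pv_min_matches_eq _ 5 hmem hlb]
            refine pv_level_cases level (fun l => _ = _) ?_ ?_ ?_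
            · intro h; subst h; rfl
            · intro h; subst h; rfl
            · intro h1 h2 h3; simp only [h1, h2, h3]; rfl
          | false =>
            rw [show (["language", "spanish", "french", "german", "japanese", "chinese"].any (fun term => PySem.Str.isIn term (PySem.Str.lower name))) = (PySem.Str.isIn "language" (PySem.Str.lower name) || (PySem.Str.isIn "spanish" (PySem.Str.lower name) || (PySem.Str.isIn "french" (PySem.Str.lower name) || (PySem.Str.isIn "german" (PySem.Str.lower name) || (PySem.Str.isIn "japanese" (PySem.Str.lower name) || PySem.Str.isIn "chinese" (PySem.Str.lower name)))))) from by
              simp only [List.any_cons, List.any_nil, Bool.or_false]] at hlx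
            simp only [Bool.or_eq_false_iff] at hlx
            obtain ⟨hl1, hl2, hl3, hl4, hl5, hl6⟩ := hlx
            cases hbx : List.any ["business", "finance", "marketing", "management"] (fun term => PySem.Str.isIn term (PySem.Str.lower name)) with
            | true =>
              have hmem : (6 : Int) ∈ pvMatches (PySem.Str.lower name) (PySem.Str.lower description) := by
                rw [List.any_eq_true] at hbx
                obtain ⟨kw, hkm, hkp⟩ := hbx
                fin_cases hkm
                · exact pv_matches_mem _ _ ("business", true, 6) (by decide) hkp
                · exact pv_matches_mem _ _ ("finance", true, 6) (by decide) hkp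
                · exact pv_matches_mem _ _ ("marketing", true, 6) (by decide) hkp
                · exact pv_matches_mem _ _ ("management", true, 6) (by decide) hkp
              have hlb : ∀ m ∈ pvMatches (PySem.Str.lower name) (PySem.Str.lower description), (6:Int) ≤ m := by
                apply pv_matches_lb
                intro t ht hlt
                fin_cases ht
                · exact hc1
                · exact hc2
                · exact hp1
                · exact hp2
                · exact hp3
                · exact hp4
                · exact hp5
                · exact ha1
                · exact ha2
                · exact ha3
                · exact ha4
                · exact ha5
                · exact hd1
                · exact hd2
                · exact hl1
                · exact hl2
                · exact hl3
                · exact hl4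
                · exact hl5
                · exact hl6
                · exact absurd hlt (by decide)
                · exact absurd hlt (by decide)
                · exact absurd hlt (by decide)
                · exact absurd hlt (by decide)
                · exact absurd hlt (by decide)
                · exact absurd hlt (by decide)
                · exact absurd hlt (by decide)
                · exact absurd hlt (by decide)
                · exact absurd hlt (by decide)
                · exact absurd hlt (by decide)
                · exact absurd hlt (by decide)
              rw [pv_min_matches_eq _ 6 hmem hlb]
              refine pv_level_cases level (fun l => _ = _) ?_ ?_ ?_
              · intro h; subst h; rfl
              · intro h; subst h; rfl
              · intro h1 h2 h3; simp only [h1, h2, h3]; rfl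
            | false =>
              rw [show (["business", "finance", "marketing", "management"].any (fun term => PySem.Str.isIn term (PySem.Str.lower name))) = (PySem.Str.isIn "business" (PySem.Str.lower name) || (PySem.Str.isIn "finance" (PySem.Str.lower name) || (PySem.Str.isIn "marketing" (PySem.Str.lower name) || PySem.Str.isIn "management" (PySem.Str.lower name)))) from by
                simp only [List.any_cons, List.any_nil, Bool.or_false]] at hbx
              simp only [Bool.or_eq_false_iff] at hbx
              obtain ⟨hb1, hb2, hb3, hb4⟩ := hbx
              cases hrx : List.any ["art", "design", "music", "guitar", "piano", "drawing", "photography"] (fun term => PySem.Str.isIn term (PySem.Str.lower name)) with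
              | true =>
                have hmem : (7 : Int) ∈ pvMatches (PySem.Str.lower name) (PySem.Str.lower description) := by
                  rw [List.any_eq_true] at hrx
                  obtain ⟨kw, hkm, hkp⟩ := hrx
                  fin_cases hkm
                  · exact pv_matches_mem _ _ ("art", true, 7) (by decide) hkp
                  · exact pv_matches_mem _ _ ("design", true, 7) (by decide) hkp
                  · exact pv_matches_mem _ _ ("music", true, 7) (by decide) hkp
                  · exact pv_matches_mem _ _ ("guitar", true, 7) (by decide) hkp
                  · exact pv_matches_mem _ _ ("piano", true, 7) (by decide) hkp
                  · exact pv_matches_mem _ _ ("drawing", true, 7) (by decide) hkp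
                  · exact pv_matches_mem _ _ ("photography", true, 7) (by decide) hkp
                have hlb : ∀ m ∈ pvMatches (PySem.Str.lower name) (PySem.Str.lower description), (7:Int) ≤ m := by
                  apply pv_matches_lb
                  intro t ht hlt
                  fin_cases ht
                  · exact hc1
                  · exact hc2
                  · exact hp1
                  · exact hp2
                  · exact hp3
                  · exact hp4
                  · exact hp5
                  · exact ha1
                  · exact ha2
                  · exact ha3
                  · exact ha4
                  · exact ha5
                  · exact hd1
                  · exact hd2
                  · exact hl1
                  · exact hl2
                  · exact hl3
                  · exact hl4
                  · exact hl5
                  · exact hl6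
                  · exact hb1
                  · exact hb2
                  · exact hb3
                  · exact hb4
                  · exact absurd hlt (by decide)
                  · exact absurd hlt (by decide)
                  · exact absurd hlt (by decide)
                  · exact absurd hlt (by decide)
                  · exact absurd hlt (by decide)
                  · exact absurd hlt (by decide)
                  · exact absurd hlt (by decide)
                rw [pv_min_matches_eq _ 7 hmem hlb]
                refine pv_level_cases level (fun l => _ = _) ?_ ?_ ?_
                · intro h; subst h; rfl
                · intro h; subst h; rfl
                · intro h1 h2 h3; simp only [h1, h2, h3]; rfl
              | false =>
                rw [show (["art", "design", "music", "guitar", "piano", "drawing", "photography"].any (fun term => PySem.Str.isIn term (PySem.Str.lower name))) = (PySem.Str.isIn "art" (PySem.Str.lower name) || (PySem.Str.isIn "design" (PySem.Str.lower name) || (PySem.Str.isIn "music" (PySem.Str.lower name) || (PySem.Str.isIn "guitar" (PySem.Str.lower name) || (PySem.Str.isIn "piano" (PySem.Str.lower name) || (PySem.Str.isIn "drawing" (PySem.Str.lower name) || PySem.Str.isIn "photography" (PySem.Str.lower name))))))) from by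
                  simp only [List.any_cons, List.any_nil, Bool.or_false]] at hrx
                simp only [Bool.or_eq_false_iff] at hrx
                obtain ⟨hr1, hr2, hr3, hr4, hr5, hr6, hr7⟩ := hrx
                have hnil : pvMatches (PySem.Str.lower name) (PySem.Str.lower description) = [] := by
                  rw [pvMatches, List.filterMap_eq_nil_iff]
                  intro t ht
                  fin_cases ht
                  · exact pv_none_of_false hc1
                  · exact pv_none_of_false hc2
                  · exact pv_none_of_false hp1
                  · exact pv_none_of_false hp2
                  · exact pv_none_of_false hp3
                  · exact pv_none_of_false hp4
                  · exact pv_none_of_false hp5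
                  · exact pv_none_of_false ha1
                  · exact pv_none_of_false ha2
                  · exact pv_none_of_false ha3
                  · exact pv_none_of_false ha4
                  · exact pv_none_of_false ha5
                  · exact pv_none_of_false hd1
                  · exact pv_none_of_false hd2
                  · exact pv_none_of_false hl1
                  · exact pv_none_of_false hl2
                  · exact pv_none_of_false hl3
                  · exact pv_none_of_false hl4
                  · exact pv_none_of_false hl5
                  · exact pv_none_of_false hl6
                  · exact pv_none_of_false hb1
                  · exact pv_none_of_false hb2
                  · exact pv_none_of_false hb3
                  · exact pv_none_of_false hb4
                  · exact pv_none_of_false hr1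
                  · exact pv_none_of_false hr2
                  · exact pv_none_of_false hr3
                  · exact pv_none_of_false hr4
                  · exact pv_none_of_false hr5
                  · exact pv_none_of_false hr6
                  · exact pv_none_of_false hr7
                rw [hnil]
                rfl
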